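-- pv_equiv track=rewrite | github.com/TuanMinh926/Hapri | table.py | classification_bor
-- ===== SOURCE A (Python) =====
-- from itertools import zip_longest
--
-- def classification_bor(lst_border):
--   lst_begin = []
--   lst_end = []
--   if len(lst_border) > 1:
--     for i in range(len(lst_border)):
--       if i%2 == 0:
--         lst_begin.append(lst_border[i])
--       else:
--         if lst_border[i-1][1] < lst_border[i][1]:
--           lst_begin[i-len(lst_begin)][1] = lst_border[i][1]
--         lst_end.append(lst_border[i][0])
--     return list(zip_longest(lst_begin,lst_end))
--   else:
--     return list(zip(lst_border))
-- ===== SOURCE B (Python) =====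
-- def classification_bor(lst_border):
--     if len(lst_border) <= 1:
--         return list(zip(lst_border))
--     return _cb_pairs(lst_border, 0, len(lst_border))
--
--
-- def _cb_pairs(lst, lo, hi):
--     # Pair up lst[lo:hi] (lo is an even-aligned segment start) by divide and conquer:
--     # split at an even offset, recurse on each half, concatenate.  Depth O(log n).
--     k = hi - lo
--     if k == 0:
--         return []
--     if k == 1:
--         return [(lst[lo], None)]
--     if k == 2:
--         b = lst[lo]
--         e = lst[lo + 1]
--         if b[1] < e[1]:
--             b[1] = e[1]
--         return [(b, e[0])]
--     m = 2 * ((k + 2) // 4)  # even split point, 2 <= m < k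
--     return _cb_pairs(lst, lo, lo + m) + _cb_pairs(lst, lo + m, hi)
-- ===== Notes on version B (the rewrite author's own statement) =====
-- stated objective: alternative
-- what changed: B pairs the borders by divide and conquer - split the segment at an even offset, recurse on both halves, concatenate - instead of A's single indexed parity-branching loop that maintains two parallel lists and joins them with zip_longest.
-- outside the precondition, e.g. on classification_bor([[1, 2]]): A returns [([1, 2],)], B returns [([1, 2],)]
import Mathlib
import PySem

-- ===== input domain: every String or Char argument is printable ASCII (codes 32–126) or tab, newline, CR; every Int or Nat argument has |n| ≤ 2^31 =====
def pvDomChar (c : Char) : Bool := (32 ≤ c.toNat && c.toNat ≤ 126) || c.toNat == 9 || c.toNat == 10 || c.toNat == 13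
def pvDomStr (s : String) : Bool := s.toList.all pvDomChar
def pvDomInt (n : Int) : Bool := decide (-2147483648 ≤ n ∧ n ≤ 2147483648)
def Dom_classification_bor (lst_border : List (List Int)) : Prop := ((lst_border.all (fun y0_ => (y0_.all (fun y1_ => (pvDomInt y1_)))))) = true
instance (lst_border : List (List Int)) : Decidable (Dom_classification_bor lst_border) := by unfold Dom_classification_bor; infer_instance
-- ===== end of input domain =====

-- B pairs the borders by divide and conquer — split the segment at an even offset, recurse on the
-- two halves, concatenate — instead of A's indexed parity-branching loop with two parallel lists
-- joined by zip_longest; same return value, and B performs the same in-place mutation of the inner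
-- lists as A (the equivalence proved here is about the return value).

-- ===== PORT A =====
-- list(zip_longest(begin, end)): Python pads the shorter list with None; here `begin` is never
-- shorter than `end`, so the left-padding case (a (None, e) pair, not representable in the return
-- type) is ported as the unreachable `[]` branch.
def pvZipLongestA : List (List Int) → List Int → List (List Int × Option Int)
  | [], _ => []
  | b :: bs, [] => (b, none) :: pvZipLongestA bs []
  | b :: bs, e :: es => (b, some e) :: pvZipLongestA bs es

-- the body of A's `for i in range(len(lst_border))` loop, state = (lst_begin, lst_end);
-- `i % 2` : Lean's Int.emod agrees with Python's % for the positive divisor 2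
def pvStepA (l : List (List Int)) (st : List (List Int) × List Int) (i : Int) :
    List (List Int) × List Int :=
  if i % 2 == 0 then
    (st.1 ++ [PySem.List.pyGetD l i []], st.2)
  else
    let begin1 :=
      if PySem.List.pyGetD (PySem.List.pyGetD l (i - 1) []) 1 0 <
         PySem.List.pyGetD (PySem.List.pyGetD l i []) 1 0 then
        PySem.List.pySetD st.1 (i - st.1.length)
          (PySem.List.pySetD (PySem.List.pyGetD st.1 (i - st.1.length) []) 1
            (PySem.List.pyGetD (PySem.List.pyGetD l i []) 1 0))
      else st.1
    (begin1, st.2 ++ [PySem.List.pyGetD (PySem.List.pyGetD l i []) 0 0])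

def classification_bor (lst_border : List (List Int)) : List (List Int × Option Int) :=
  if lst_border.length > 1 then
    let st := (PySem.List.pyRange 0 lst_border.length 1).foldl (pvStepA lst_border) ([], [])
    pvZipLongestA st.1 st.2
  else
    -- list(zip(lst_border)): [] for the empty list; for a single element Python returns a
    -- 1-tuple, which is outside the declared return type and excluded by Pre_
    []

-- ===== PORT B =====
-- _cb_pairs(lst, lo, hi): divide and conquer over the segment [lo, hi).  Python tests `k == 0`;
-- the port's guard is `k ≤ 0` for termination — every call reachable from the entry point has
-- lo ≤ hi, so the two agree.
def pvCbPairs (l : List (List Int)) (lo hi : Int) : List (List Int × Option Int) :=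
  let k := hi - lo
  if _h0 : k ≤ 0 then []
  else if _h1 : k = 1 then [(PySem.List.pyGetD l lo [], none)]
  else if _h2 : k = 2 then
    let b := PySem.List.pyGetD l lo []
    let e := PySem.List.pyGetD l (lo + 1) []
    let b := if PySem.List.pyGetD b 1 0 < PySem.List.pyGetD e 1 0 then
               PySem.List.pySetD b 1 (PySem.List.pyGetD e 1 0)
             else b
    [(b, some (PySem.List.pyGetD e 0 0))]
  else
    let m := 2 * (PySem.Int.floordiv (k + 2) 4)
    pvCbPairs l lo (lo + m) ++ pvCbPairs l (lo + m) hi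
termination_by (hi - lo).toNat
decreasing_by
  · have hm : PySem.Int.floordiv (hi - lo + 2) 4 = (hi - lo + 2) / 4 :=
      PySem.Int.floordiv_eq_ediv_of_pos (by omega)
    omega
  · have hm : PySem.Int.floordiv (hi - lo + 2) 4 = (hi - lo + 2) / 4 :=
      PySem.Int.floordiv_eq_ediv_of_pos (by omega)
    omega

def classification_bor_alt (lst_border : List (List Int)) : List (List Int × Option Int) :=
  if (lst_border.length : Int) ≤ 1 then
    [] -- list(zip(lst_border)); see the comment in port A
  else
    pvCbPairs lst_border 0 lst_border.length

-- ===== PRECONDITION & SPEC =====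
-- Pre_ excludes (a) single-element lists, where A returns a 1-tuple [(x,)] that is not a value of
-- the declared return type list[tuple[list, Optional[int]]] (B returns the same there), and
-- (b) inputs where A raises IndexError because an element read at index [0]/[1] is too short.
def Pre_classification_bor (lst_border : List (List Int)) : Prop :=
  lst_border.length ≠ 1 ∧
  ∀ i : Nat, i < lst_border.length → i % 2 = 1 →
    2 ≤ (lst_border.getD (i - 1) []).length ∧ 2 ≤ (lst_border.getD i []).length
instance (lst_border : List (List Int)) : Decidable (Pre_classification_bor lst_border) := by
  unfold Pre_classification_bor; infer_instance

def pvWitness_classification_bor : List (List Int) := [[1, 2], [3, 4], [5, 6]]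

def Spec_classification_bor (lst_border : List (List Int)) (out : List (List Int × Option Int)) : Prop := out = classification_bor_alt lst_border
instance (lst_border : List (List Int)) (out : List (List Int × Option Int)) : Decidable (Spec_classification_bor lst_border out) := by unfold Spec_classification_bor; infer_instance

-- ===== CLAIM (what is proved, stated in full; the proofs are below) =====
def Claim_equal_classification_bor : Prop := ∀ (lst_border : List (List Int)), Dom_classification_bor lst_border → Pre_classification_bor lst_border → Spec_classification_bor lst_border (classification_bor lst_border)

-- ===== LEMMAS AND PROOFS =====

-- the mutated begin element of a pair, and the pairing both programs compute
def pvMut (b e : List Int) : List Int :=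
  if PySem.List.pyGetD b 1 0 < PySem.List.pyGetD e 1 0 then
    PySem.List.pySetD b 1 (PySem.List.pyGetD e 1 0)
  else b

def pvPairs : List (List Int) → List (List Int × Option Int)
  | [] => []
  | [b] => [(b, none)]
  | b :: e :: r => (pvMut b e, some (PySem.List.pyGetD e 0 0)) :: pvPairs r

def pvBegin : List (List Int) → List (List Int)
  | [] => []
  | [b] => [b]
  | b :: e :: r => pvMut b e :: pvBegin r

def pvEnd : List (List Int) → List Int
  | [] => []
  | [_] => []
  | _ :: e :: r => PySem.List.pyGetD e 0 0 :: pvEnd r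

lemma zipLongest_begin_end (l : List (List Int)) :
    pvZipLongestA (pvBegin l) (pvEnd l) = pvPairs l := by
  induction l using pvPairs.induct with
  | case1 => simp [pvBegin, pvEnd, pvPairs, pvZipLongestA]
  | case2 b => simp [pvBegin, pvEnd, pvPairs, pvZipLongestA]
  | case3 b e r ih => simp [pvBegin, pvEnd, pvPairs, pvZipLongestA, ih]

lemma pyGetD_append_len (pre : List (List Int)) (b : List Int) (r : List (List Int)) :
    PySem.List.pyGetD (pre ++ b :: r) (pre.length : Int) [] = b := by
  rw [PySem.List.pyGetD_natCast]
  simp [List.getD]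

lemma pyGetD_append_len_succ (pre : List (List Int)) (b e : List Int) (r : List (List Int)) :
    PySem.List.pyGetD (pre ++ b :: e :: r) ((pre.length : Int) + 1) [] = e := by
  have : ((pre.length : Int) + 1) = ((pre.length + 1 : Nat) : Int) := by push_cast; ring
  rw [this, PySem.List.pyGetD_natCast]
  simp [List.getD]

lemma A_loop (rest : List (List Int)) : ∀ (pre : List (List Int)) (B : List (List Int)) (E : List Int),
    pre.length = 2 * B.length →
    (PySem.List.pyRange (pre.length) (pre.length + rest.length) 1).foldl
        (pvStepA (pre ++ rest)) (B, E)
      = (B ++ pvBegin rest, E ++ pvEnd rest) := by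
  induction rest using pvPairs.induct with
  | case1 =>
    intro pre B E _
    simp [PySem.List.pyRange_one_eq_nil, pvBegin, pvEnd]
  | case2 b =>
    intro pre B E hlen
    have h1 : (pre.length : Int) < pre.length + ([b] : List (List Int)).length := by
      simp only [List.length_cons, List.length_nil]; push_cast; omega
    rw [show (PySem.List.pyRange (pre.length) (pre.length + ([b] : List (List Int)).length) 1)
        = [(pre.length : Int)] by
      rw [PySem.List.pyRange_one_cons h1]
      rw [PySem.List.pyRange_one_eq_nil (by simp only [List.length_cons, List.length_nil]; push_cast; omega)]]
    have hmod : (((pre.length : Int)) % 2 == 0) = true := by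
      simp only [beq_iff_eq, hlen]; push_cast; omega
    simp [List.foldl, pvStepA, hmod, pvBegin, pvEnd, List.getD]
  | case3 b e r ih =>
    intro pre B E hlen
    have h1 : (pre.length : Int) < pre.length + (b :: e :: r).length := by
      simp only [List.length_cons]; push_cast; omega
    have h2 : (pre.length : Int) + 1 < pre.length + (b :: e :: r).length := by
      simp only [List.length_cons]; push_cast; omega
    rw [PySem.List.pyRange_one_cons h1, PySem.List.pyRange_one_cons h2]
    have hmod : (((pre.length : Int)) % 2 == 0) = true := by
      simp only [beq_iff_eq, hlen]; push_cast; omega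
    have hmod1 : ((((pre.length : Int)) + 1) % 2 == 0) = false := by
      simp only [beq_eq_false_iff_ne, ne_eq, hlen]; push_cast; omega
    -- first step appends b to lst_begin; second (odd) step mutates it and appends e[0] to lst_end
    simp only [List.foldl_cons]
    rw [show pvStepA (pre ++ b :: e :: r) (B, E) (pre.length : Int) = (B ++ [b], E) by
      simp [pvStepA, hmod]]
    have hsub : ((pre.length : Int) + 1 - 1) = (pre.length : Int) := by ring
    have hidx : ((pre.length : Int) + 1 - ((B ++ [b]).length : Int)) = ((B.length : Nat) : Int) := by
      simp only [List.length_append, List.length_cons, List.length_nil]; push_cast; omega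
    have hgetB : PySem.List.pyGetD (B ++ [b]) ((B.length : Nat) : Int) [] = b := by
      rw [PySem.List.pyGetD_natCast]; simp [List.getD]
    have hsetB : ∀ v, PySem.List.pySetD (B ++ [b]) ((B.length : Nat) : Int) v = B ++ [v] := by
      intro v
      rw [PySem.List.pySetD_natCast, List.set_append]
      simp
    rw [show pvStepA (pre ++ b :: e :: r) (B ++ [b], E) ((pre.length : Int) + 1)
        = (B ++ [pvMut b e], E ++ [PySem.List.pyGetD e 0 0]) by
      simp only [pvStepA, hmod1, Bool.false_eq_true, if_false, hsub,
        pyGetD_append_len, pyGetD_append_len_succ, hidx, hgetB, hsetB]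
      unfold pvMut
      split_ifs <;> rfl]
    have hre : pre ++ b :: e :: r = (pre ++ [b, e]) ++ r := by simp
    have hr1 : (pre.length : Int) + 1 + 1 = (((pre ++ [b, e]).length : Nat) : Int) := by
      simp only [List.length_append, List.length_cons, List.length_nil]; push_cast; omega
    have hr2 : (pre.length : Int) + ((b :: e :: r).length : Int)
        = (((pre ++ [b, e]).length : Nat) : Int) + (r.length : Int) := by
      simp only [List.length_append, List.length_cons, List.length_nil]; push_cast; omega
    rw [hr1, hr2, hre,
      ih (pre ++ [b, e]) (B ++ [pvMut b e]) (E ++ [PySem.List.pyGetD e 0 0])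
        (by simp only [List.length_append, List.length_cons, List.length_nil]; omega)]
    simp [pvBegin, pvEnd]

-- pvPairs splits over an append at an even position: the key fact for the divide-and-conquer side
lemma pvPairs_append (x y : List (List Int)) (hx : x.length % 2 = 0) :
    pvPairs (x ++ y) = pvPairs x ++ pvPairs y := by
  induction x using pvPairs.induct with
  | case1 => simp [pvPairs]
  | case2 b => simp at hx
  | case3 b e r ih =>
    simp only [List.length_cons] at hx
    simp only [List.cons_append, pvPairs, ih (by omega)]

-- B's divide and conquer on a segment computes pvPairs of that segment
lemma B_seg : ∀ (k : Nat) (rest pre suf : List (List Int)), rest.length = k →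
    pvCbPairs (pre ++ rest ++ suf) (pre.length) ((pre.length : Int) + rest.length)
      = pvPairs rest := by
  intro k
  induction k using Nat.strong_induction_on with
  | _ k ih =>
    intro rest pre suf hk
    rw [pvCbPairs]
    simp only []
    by_cases h0 : ((pre.length : Int) + rest.length - pre.length ≤ 0)
    · rw [dif_pos h0]
      have : rest = [] := by
        cases rest with
        | nil => rfl
        | cons a r => exfalso; simp only [List.length_cons] at h0; push_cast at h0; omega
      simp [this, pvPairs]
    · rw [dif_neg h0]
      by_cases h1 : ((pre.length : Int) + rest.length - pre.length = 1)
      · rw [dif_pos h1]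
        have hlen : rest.length = 1 := by push_cast at h1; omega
        obtain ⟨b, hb⟩ : ∃ b, rest = [b] := by
          cases rest with
          | nil => simp at hlen
          | cons a r =>
            cases r with
            | nil => exact ⟨a, rfl⟩
            | cons _ _ => simp at hlen
        subst hb
        rw [show pre ++ [b] ++ suf = pre ++ b :: suf by simp]
        rw [pyGetD_append_len]
        simp [pvPairs]
      · rw [dif_neg h1]
        by_cases h2 : ((pre.length : Int) + rest.length - pre.length = 2)
        · rw [dif_pos h2]
          have hlen : rest.length = 2 := by push_cast at h2; omega
          obtain ⟨b, e, hb⟩ : ∃ b e, rest = [b, e] := by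
            match rest, hlen with
            | [b, e], _ => exact ⟨b, e, rfl⟩
          subst hb
          rw [show pre ++ [b, e] ++ suf = pre ++ b :: e :: suf by simp]
          rw [pyGetD_append_len, pyGetD_append_len_succ]
          simp [pvPairs, pvMut]
        · -- k ≥ 3: split at the even offset m, apply the IH to each half
          have hk3 : 3 ≤ rest.length := by omega
          set kk : Int := (pre.length : Int) + rest.length - pre.length with hkk
          have hkv : kk = (rest.length : Int) := by omega
          have hfd : PySem.Int.floordiv (kk + 2) 4 = (kk + 2) / 4 :=
            PySem.Int.floordiv_eq_ediv_of_pos (by omega)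
          set m : Int := 2 * PySem.Int.floordiv (kk + 2) 4 with hm
          have hm2 : 2 ≤ m := by rw [hm, hfd]; push_cast at hkv ⊢; omega
          have hmk : m < kk := by rw [hm, hfd]; push_cast at hkv ⊢; omega
          have hmeven : m % 2 = 0 := by rw [hm]; omega
          set mn : Nat := m.toNat with hmn
          have hmcast : (mn : Int) = m := by omega
          have htk : (rest.take mn).length = mn := by
            rw [List.length_take]; push_cast at hkv; omega
          have hdk : (rest.drop mn).length = rest.length - mn := by
            rw [List.length_drop]
          -- left half
          have hL := ih mn (by omega) (rest.take mn) pre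
            ((rest.drop mn) ++ suf) htk
          have hR := ih (rest.length - mn) (by omega) (rest.drop mn)
            (pre ++ rest.take mn) suf hdk
          have hsplit : rest.take mn ++ (rest.drop mn ++ suf) = rest ++ suf := by
            rw [← List.append_assoc, List.take_append_drop]
          simp only [List.append_assoc] at hL hR
          rw [hsplit, ← List.append_assoc] at hL hR
          rw [htk] at hL
          rw [hdk] at hR
          have e1 : (pre.length : Int) + m = ((pre ++ rest.take mn).length : Int) := by
            simp only [List.length_append, htk]; push_cast; omega
          have e2 : (pre.length : Int) + (rest.length : Int)
              = ((pre ++ rest.take mn).length : Int) + ((rest.length - mn : Nat) : Int) := by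
            simp only [List.length_append, htk]; push_cast at hkv ⊢; omega
          have e1' : (pre.length : Int) + (mn : Int) = ((pre ++ rest.take mn).length : Int) := by
            rw [hmcast]; exact e1
          rw [dif_neg h2, ← hmcast, hL, e1', e2, hR,
            ← pvPairs_append _ _ (by rw [htk]; omega), List.take_append_drop]

-- ===== VERDICT (by name: the statement is the Claim_ definition above) =====
theorem classification_bor_spec : Claim_equal_classification_bor := by
  intro l _ _
  simp only [Spec_classification_bor, classification_bor, classification_bor_alt]
  by_cases h : l.length > 1
  · rw [if_pos h, if_neg (by omega)]
    have hA := A_loop l [] [] [] (by simp)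
    have hB := B_seg l.length l [] [] rfl
    simp only [List.length_nil, Nat.cast_zero, List.nil_append, List.append_nil, zero_add] at hA hB
    rw [hA, zipLongest_begin_end, ← hB]
  · rw [if_neg h, if_pos (by omega)]
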